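-- pv_equiv track=rewrite | github.com/byunghun-jake/algorithm | SWEA/3_stack_DFS/d2_4880_토너먼트 카드게임/main.py | solve
-- ===== SOURCE A (Python) =====
-- def compare(compare_arr):
--     a = compare_arr[0][0]
--     b = compare_arr[1][0]
--     if (a - b) == -1 or (a - b) == 2:
--         return 1
--     else:
--         return 0
--
-- def solve(arr, idx_arr):
--     # 종료 조건
--     if len(arr) == 1:
--         return arr[0], idx_arr[0]
--
--     # 배열을 반으로 나눈다.
--     mid_idx = (len(arr) // 2) + (len(arr) % 2)
--
--     a_arr = arr[:mid_idx]
--     a_idx_arr = idx_arr[:mid_idx]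
--     b_arr = arr[mid_idx:]
--     b_idx_arr = idx_arr[mid_idx:]
--
--     # 비교
--     temp = [solve(a_arr, a_idx_arr), solve(b_arr, b_idx_arr)]
--     idx = compare(temp)
--     return temp[idx][0], temp[idx][1]
-- ===== SOURCE B (Python) =====
-- def solve(arr, idx_arr):
--     # Iterative post-order DFS over index ranges with an explicit task stack
--     # (None = "combine the two results on top of the results stack").
--     tasks = [(0, len(arr))]
--     out = []
--     while tasks:
--         t = tasks.pop()
--         if t is None:
--             b = out.pop()
--             a = out.pop()
--             out.append(b if (a[0] - b[0]) in (-1, 2) else a)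
--         else:
--             lo, hi = t
--             if hi - lo == 1:
--                 out.append((arr[lo], idx_arr[lo]))
--             else:
--                 mid = lo + (hi - lo + 1) // 2
--                 tasks.append(None)
--                 tasks.append((mid, hi))
--                 tasks.append((lo, mid))
--     return out[0]
-- ===== Notes on version B (the rewrite author's own statement) =====
-- stated objective: alternative
-- what changed: Replaces A's recursive halving over materialized list slices with an iterative post-order DFS over (lo, hi) index ranges using an explicit task stack with combine markers and a results stack, so no sublists are copied.
import Mathlib
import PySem

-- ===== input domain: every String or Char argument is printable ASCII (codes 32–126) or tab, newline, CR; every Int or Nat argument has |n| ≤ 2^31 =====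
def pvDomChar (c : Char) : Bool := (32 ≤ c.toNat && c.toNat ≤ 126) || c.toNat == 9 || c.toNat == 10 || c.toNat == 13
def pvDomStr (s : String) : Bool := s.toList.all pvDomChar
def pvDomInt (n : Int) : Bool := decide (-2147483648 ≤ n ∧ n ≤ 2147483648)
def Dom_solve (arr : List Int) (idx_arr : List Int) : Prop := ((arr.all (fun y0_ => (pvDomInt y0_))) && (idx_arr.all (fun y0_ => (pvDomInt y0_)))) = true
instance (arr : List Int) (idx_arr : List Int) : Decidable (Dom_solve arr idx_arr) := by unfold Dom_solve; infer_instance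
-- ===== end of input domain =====

-- B replaces A's recursive bracket with an explicit stack-driven post-order DFS over
-- index ranges (objective: alternative decomposition, same cost).

-- ===== PORT A =====
-- compare(compare_arr) on the two-element list temp = [ta, tb]: a = ta[0], b = tb[0].
def pyCompare (ta tb : Int × Int) : Int :=
  if ta.1 - tb.1 = -1 ∨ ta.1 - tb.1 = 2 then 1 else 0

-- arr[:mid]/arr[mid:] with 0 ≤ mid are exactly take/drop.  The `≤ 1` (instead of `= 1`)
-- in the base case is only a totality guard: on arr = [] Python A recurses forever
-- (RecursionError), which Pre_solve excludes.
def solve (arr : List Int) (idx_arr : List Int) : Int × Int :=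
  if arr.length ≤ 1 then (arr.headD 0, idx_arr.headD 0)
  else
    let mid := arr.length / 2 + arr.length % 2
    let ta := solve (arr.take mid) (idx_arr.take mid)
    let tb := solve (arr.drop mid) (idx_arr.drop mid)
    let idx := pyCompare ta tb
    if idx = 1 then tb else ta
termination_by arr.length
decreasing_by
  · simp only [List.length_take]; omega
  · simp only [List.length_drop]; omega

-- ===== PORT B =====
def combineB (a b : Int × Int) : Int × Int :=
  if a.1 - b.1 = -1 ∨ a.1 - b.1 = 2 then b else a

-- The while-loop of Source B: `tasks` is the task stack (head = top; `none` is the combine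
-- marker), `out` the results stack (head = top).  Fuel only makes the loop total; it is
-- never exhausted for the initial task under Pre_solve.  Python's final `out[0]` is the
-- single remaining element, i.e. the last element of the head-as-top list.
def loopB (arr idx_arr : List Int) : Nat → List (Option (Nat × Nat)) → List (Int × Int) → Int × Int
  | 0, _, out => out.getLastD (0, 0)
  | _ + 1, [], out => out.getLastD (0, 0)
  | fuel + 1, none :: rest, out =>
    match out with
    | b :: a :: out' => loopB arr idx_arr fuel rest (combineB a b :: out')
    | _ => (0, 0)      -- unreachable: Python would raise IndexError on out.pop()
  | fuel + 1, some (lo, hi) :: rest, out =>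
    if hi - lo = 1 then
      loopB arr idx_arr fuel rest ((arr.getD lo 0, idx_arr.getD lo 0) :: out)
    else
      let mid := lo + (hi - lo + 1) / 2
      loopB arr idx_arr fuel (some (lo, mid) :: some (mid, hi) :: none :: rest) out

def solve_alt (arr : List Int) (idx_arr : List Int) : Int × Int :=
  loopB arr idx_arr (3 * arr.length + 2) [some (0, arr.length)] []

-- ===== PRECONDITION & SPEC =====
-- Pre_solve is exactly where Python A returns: on arr = [] it hits RecursionError, and
-- with idx_arr shorter than arr the last leaf raises IndexError on idx_arr[0].
def Pre_solve (arr : List Int) (idx_arr : List Int) : Prop :=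
  arr ≠ [] ∧ arr.length ≤ idx_arr.length
instance (arr : List Int) (idx_arr : List Int) : Decidable (Pre_solve arr idx_arr) := by
  unfold Pre_solve; infer_instance

def pvWitness_solve : List Int × List Int := ([1, 2, 3], [10, 20, 30])

def Spec_solve (arr : List Int) (idx_arr : List Int) (out : Int × Int) : Prop := out = solve_alt arr idx_arr
instance (arr : List Int) (idx_arr : List Int) (out : Int × Int) : Decidable (Spec_solve arr idx_arr out) := by unfold Spec_solve; infer_instance

-- ===== CLAIM (what is proved, stated in full; the proofs are below) =====
def Claim_equal_solve : Prop := ∀ (arr : List Int) (idx_arr : List Int), Dom_solve arr idx_arr → Pre_solve arr idx_arr → Spec_solve arr idx_arr (solve arr idx_arr)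

-- ===== LEMMAS AND PROOFS =====

-- Reference function: the tournament winner of the index range [lo, lo+n) of the arrays.
def fspec (arr idx_arr : List Int) (lo n : Nat) : Int × Int :=
  if n ≤ 1 then (arr.getD lo 0, idx_arr.getD lo 0)
  else
    let m := (n + 1) / 2
    combineB (fspec arr idx_arr lo m) (fspec arr idx_arr (lo + m) (n - m))
termination_by n
decreasing_by all_goals omega

theorem loopB_run (arr idx_arr : List Int) :
    ∀ n, 1 ≤ n → ∀ lo rest out fuel,
      loopB arr idx_arr (3 * n - 2 + fuel) (some (lo, lo + n) :: rest) out =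
        loopB arr idx_arr fuel rest (fspec arr idx_arr lo n :: out) := by
  intro n
  induction n using Nat.strong_induction_on with
  | _ n ih =>
    intro hn lo rest out fuel
    rcases Nat.lt_or_ge n 2 with h2 | h2
    · interval_cases n
      have e : 3 * 1 - 2 + fuel = fuel + 1 := by omega
      rw [e]
      simp [loopB, fspec]
    · set m := (n + 1) / 2 with hm
      have hm1 : 1 ≤ m := by omega
      have hmn : m < n := by omega
      have hk1 : 1 ≤ n - m := by omega
      have hkn : n - m < n := by omega
      have e1 : 3 * n - 2 + fuel = (3 * n - 3 + fuel) + 1 := by omega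
      rw [e1]
      have hstep : loopB arr idx_arr ((3 * n - 3 + fuel) + 1) (some (lo, lo + n) :: rest) out =
          loopB arr idx_arr (3 * n - 3 + fuel)
            (some (lo, lo + m) :: some (lo + m, lo + n) :: none :: rest) out := by
        show loopB arr idx_arr ((3 * n - 3 + fuel) + 1) (some (lo, lo + n) :: rest) out = _
        rw [loopB]
        have hne : ¬ (lo + n - lo = 1) := by omega
        rw [if_neg hne]
        have : lo + (lo + n - lo + 1) / 2 = lo + m := by omega
        rw [this]
      rw [hstep]
      have e2 : 3 * n - 3 + fuel = 3 * m - 2 + (3 * (n - m) - 2 + (fuel + 1)) := by omega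
      rw [e2, ih m hmn hm1]
      have e3 : lo + n = (lo + m) + (n - m) := by omega
      rw [e3, ih (n - m) hkn hk1]
      have hnone : loopB arr idx_arr (fuel + 1)
          (none :: rest)
          (fspec arr idx_arr (lo + m) (n - m) :: fspec arr idx_arr lo m :: out) =
          loopB arr idx_arr fuel rest
            (combineB (fspec arr idx_arr lo m) (fspec arr idx_arr (lo + m) (n - m)) :: out) := by
        rw [loopB]
      rw [hnone]
      have hfn : fspec arr idx_arr lo n =
          combineB (fspec arr idx_arr lo m) (fspec arr idx_arr (lo + m) (n - m)) := by
        rw [fspec]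
        have : ¬ (n ≤ 1) := by omega
        rw [if_neg this]
      rw [hfn]

theorem headD_take_drop (l : List Int) (lo k : Nat) (h : lo < l.length) (hk : 1 ≤ k) :
    ((l.drop lo).take k).headD 0 = l.getD lo 0 := by
  obtain ⟨k', rfl⟩ : ∃ k', k = k' + 1 := ⟨k - 1, by omega⟩
  rw [List.drop_eq_getElem_cons h, List.take_succ_cons, List.headD_cons,
    List.getD_eq_getElem l 0 h]

theorem solve_eq_fspec (arr idx_arr : List Int) (hlen : arr.length ≤ idx_arr.length) :
    ∀ n, 1 ≤ n → ∀ lo k, lo + n ≤ arr.length → n ≤ k →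
      solve ((arr.drop lo).take n) ((idx_arr.drop lo).take k) = fspec arr idx_arr lo n := by
  intro n
  induction n using Nat.strong_induction_on with
  | _ n ih =>
    intro hn lo k hbound hk
    have hlo : lo < arr.length := by omega
    have hlo' : lo < idx_arr.length := by omega
    rcases Nat.lt_or_ge n 2 with h2 | h2
    · interval_cases n
      rw [solve]
      rw [if_pos (by simp [List.length_take])]
      rw [fspec, if_pos (by omega)]
      rw [headD_take_drop arr lo 1 hlo (by omega), headD_take_drop idx_arr lo k hlo' hk]
    · have hslen : ((arr.drop lo).take n).length = n := by
        simp [List.length_take, List.length_drop]; omega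
      set m := (n + 1) / 2 with hm
      have hm1 : 1 ≤ m := by omega
      have hmn : m < n := by omega
      rw [solve]
      have hng : ¬ (((arr.drop lo).take n).length ≤ 1) := by omega
      rw [if_neg hng]
      have hmid : n / 2 + n % 2 = m := by omega
      have ta : (((arr.drop lo).take n).take m) = (arr.drop lo).take m := by
        rw [List.take_take]; congr 1; omega
      have ta' : (((idx_arr.drop lo).take k).take m) = (idx_arr.drop lo).take m := by
        rw [List.take_take]; congr 1; omega
      have tb : (((arr.drop lo).take n).drop m) = (arr.drop (lo + m)).take (n - m) := by
        rw [List.drop_take, List.drop_drop]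
      have tb' : (((idx_arr.drop lo).take k).drop m) = (idx_arr.drop (lo + m)).take (k - m) := by
        rw [List.drop_take, List.drop_drop]
      simp only [hslen, hmid, ta, ta', tb, tb']
      rw [ih m hmn hm1 lo m (by omega) (by omega)]
      rw [ih (n - m) (by omega) (by omega) (lo + m) (k - m) (by omega) (by omega)]
      have hfn : fspec arr idx_arr lo n =
          combineB (fspec arr idx_arr lo m) (fspec arr idx_arr (lo + m) (n - m)) := by
        rw [fspec]
        rw [if_neg (show ¬ n ≤ 1 by omega)]
      rw [hfn]
      simp only [pyCompare, combineB]
      split_ifs <;> simp_all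

-- ===== VERDICT (by name: the statement is the Claim_ definition above) =====
theorem solve_spec : Claim_equal_solve := by
  intro arr idx_arr _hdom hpre
  obtain ⟨hne, hlen⟩ := hpre
  have hn : 1 ≤ arr.length := List.length_pos_iff.mpr hne
  unfold Spec_solve solve_alt
  have e : 3 * arr.length + 2 = 3 * arr.length - 2 + 4 := by omega
  have hrun := loopB_run arr idx_arr arr.length hn 0 [] [] 4
  rw [Nat.zero_add] at hrun
  rw [e, hrun]
  have hA : solve arr idx_arr = fspec arr idx_arr 0 arr.length := by
    have := solve_eq_fspec arr idx_arr hlen arr.length hn 0 idx_arr.length (by omega) hlen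
    simpa using this
  rw [hA]
  rfl
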